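-- pv_equiv track=rewrite | github.com/dmlgus1922/AlgorithmSolved | 엘리스 문제은행/마법 맷돌.py | check
-- ===== SOURCE A (Python) =====
-- def u(s,t):
--     x = len(s)
--     y = len(t)
--     while x % y != 0:
--         x,y = y, x % y
--     return len(t) // y, len(s) // y
--
-- def check(s,t):
--     x, y = u(s,t)
--     if s*x == t*y:
--         return 1
--     for i in range(51):
--         if s * i == t:
--             return 1
--     else:
--         return 0
-- ===== SOURCE B (Python) =====
-- def check(s, t):
--     # Two strings are repetitions of a common base string iff they commute:
--     # s + t == t + s  (classic string commutation lemma), which A's lcm-length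
--     # repetition test decides in a far longer comparison.
--     return 1 if s + t == t + s else 0
-- ===== Notes on version B (the rewrite author's own statement) =====
-- stated objective: faster
-- what changed: A builds the two strings repeated up to their length-lcm (plus a 51-step fallback scan) and compares them; B uses the string commutation lemma and just compares s+t with t+s in one linear pass.
import Mathlib
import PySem

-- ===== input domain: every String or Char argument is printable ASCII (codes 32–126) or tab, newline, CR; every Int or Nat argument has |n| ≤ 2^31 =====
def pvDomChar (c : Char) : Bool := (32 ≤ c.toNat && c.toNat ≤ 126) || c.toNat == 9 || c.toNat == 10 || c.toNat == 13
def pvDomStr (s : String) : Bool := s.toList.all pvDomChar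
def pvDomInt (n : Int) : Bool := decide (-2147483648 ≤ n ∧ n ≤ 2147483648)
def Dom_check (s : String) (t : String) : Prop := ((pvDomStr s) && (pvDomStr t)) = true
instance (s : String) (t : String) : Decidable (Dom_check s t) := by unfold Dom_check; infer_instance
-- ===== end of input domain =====

-- B replaces A's compare-the-lcm-length-repetitions test (plus a 51-step fallback scan)
-- by the string commutation lemma: return 1 iff s+t == t+s (linear time).

-- ===== PORT A =====
-- Python's `while x % y != 0: x, y = y, x % y` on the two lengths.  Lengths are
-- nonnegative, so Python's % and // coincide with Nat's % and / here (exact on the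
-- admitted inputs); the `y = 0` branch is a totality guard for the input t = "" on
-- which Python raises ZeroDivisionError (excluded by Pre_check).
def pvULoop (x y : Nat) : Nat :=
  if hy : y = 0 then 0
  else if x % y = 0 then y
  else pvULoop y (x % y)
termination_by y
decreasing_by exact Nat.mod_lt _ (Nat.pos_of_ne_zero hy)

-- u(s, t): returns (len(t) // y, len(s) // y)
def pvU (a b : List Char) : Nat × Nat :=
  let g := pvULoop a.length b.length
  (b.length / g, a.length / g)

def check (s : String) (t : String) : Int :=
  let a := s.toList
  let b := t.toList
  let p := pvU a b
  if PySem.List.pyRepeat a (p.1 : Int) = PySem.List.pyRepeat b (p.2 : Int) then 1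
  else if (List.range 51).any (fun i => decide (PySem.List.pyRepeat a (i : Int) = b)) then 1
  else 0

-- ===== PORT B =====
def check_alt (s : String) (t : String) : Int :=
  if s.toList ++ t.toList = t.toList ++ s.toList then 1 else 0

-- ===== PRECONDITION & SPEC =====
-- Pre_ excludes only t = "", on which Python's A raises ZeroDivisionError (len(t) is a modulus).
def Pre_check (s : String) (t : String) : Prop := t ≠ ""
instance (s : String) (t : String) : Decidable (Pre_check s t) := by unfold Pre_check; infer_instance
def pvWitness_check : String × String := ("ab", "abab")

def Spec_check (s : String) (t : String) (out : Int) : Prop := out = check_alt s t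
instance (s : String) (t : String) (out : Int) : Decidable (Spec_check s t out) := by unfold Spec_check; infer_instance

-- ===== CLAIM (what is proved, stated in full; the proofs are below) =====
def Claim_equal_check : Prop := ∀ (s : String) (t : String), Dom_check s t → Pre_check s t → Spec_check s t (check s t)

-- ===== LEMMAS AND PROOFS =====

-- `rep l n` = the list l repeated n times (proof-side view of Python's `l * n`).
def rep (l : List Char) (n : Nat) : List Char := (List.replicate n l).flatten

theorem pyRepeat_cast (l : List Char) (n : Nat) :
    PySem.List.pyRepeat l (n : Int) = rep l n := by
  simp [PySem.List.pyRepeat, rep]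

theorem rep_zero (l : List Char) : rep l 0 = [] := rfl

theorem rep_succ (l : List Char) (n : Nat) : rep l (n + 1) = l ++ rep l n := by
  simp [rep, List.replicate_succ]

theorem rep_one (l : List Char) : rep l 1 = l := by simp [rep]

theorem rep_nil (n : Nat) : rep ([] : List Char) n = [] := by
  induction n with
  | zero => rfl
  | succ k ih => simp [rep_succ, ih]

theorem rep_add (l : List Char) (m n : Nat) : rep l (m + n) = rep l m ++ rep l n := by
  induction m with
  | zero => simp [rep_zero]
  | succ k ih =>
      have : k + 1 + n = (k + n) + 1 := by omega
      rw [this, rep_succ, ih, rep_succ, List.append_assoc]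

theorem length_rep (l : List Char) (n : Nat) : (rep l n).length = n * l.length := by
  induction n with
  | zero => simp [rep_zero]
  | succ k ih => rw [rep_succ]; simp [ih]; ring

theorem rep_rep (l : List Char) (m n : Nat) : rep (rep l m) n = rep l (m * n) := by
  induction n with
  | zero => simp [rep_zero]
  | succ k ih =>
      rw [rep_succ, ih, Nat.mul_succ, Nat.add_comm, rep_add]

theorem comm_rep_self (l : List Char) (n : Nat) : l ++ rep l n = rep l n ++ l := by
  calc l ++ rep l n = rep l (1 + n) := by rw [rep_add, rep_one]
    _ = rep l (n + 1) := by rw [Nat.add_comm]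
    _ = rep l n ++ l := by rw [rep_add, rep_one]

theorem take_rep (l : List Char) {n : Nat} (h : 1 ≤ n) :
    (rep l n).take l.length = l := by
  obtain ⟨k, rfl⟩ := Nat.exists_eq_add_of_le h
  rw [Nat.add_comm, rep_succ]
  exact List.take_left (l₂ := rep l k)

theorem rot (a c : List Char) (n : Nat) :
    a ++ rep (c ++ a) n = rep (a ++ c) n ++ a := by
  induction n with
  | zero => simp [rep_zero]
  | succ k ih =>
      simp only [rep_succ, List.append_assoc]
      rw [ih]

-- structure theorem: commuting lists are powers of a common list
theorem comm_struct (a b : List Char) (h : a ++ b = b ++ a) :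
    ∃ w i j, a = rep w i ∧ b = rep w j := by
  by_cases hA : a = []
  · exact ⟨b, 0, 1, by simp [hA, rep_zero], by simp [rep_one]⟩
  by_cases hB : b = []
  · exact ⟨a, 1, 0, by simp [rep_one], by simp [hB, rep_zero]⟩
  by_cases hle : a.length ≤ b.length
  · have hpre : a = b.take a.length := by
      have h1 : (a ++ b).take a.length = a := List.take_left
      have h2 : (b ++ a).take a.length = b.take a.length :=
        List.take_append_of_le_length hle
      rw [h, h2] at h1; exact h1.symm
    have hb : b = a ++ b.drop a.length := by
      conv_lhs => rw [← List.take_append_drop a.length b]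
      rw [← hpre]
    have hac : a ++ b.drop a.length = b.drop a.length ++ a := by
      have := h
      rw [hb] at this
      rw [List.append_assoc] at this
      exact List.append_cancel_left this
    have hlt : (b.drop a.length).length < b.length := by
      have : 0 < a.length := List.length_pos_iff.mpr hA
      simp [List.length_drop]; omega
    obtain ⟨w, i, j, hw1, hw2⟩ := comm_struct a (b.drop a.length) hac
    refine ⟨w, i, i + j, hw1, ?_⟩
    rw [rep_add, ← hw1, ← hw2]
    exact hb
  · have hle' : b.length ≤ a.length := by omega
    have hpre : b = a.take b.length := by
      have h1 : (b ++ a).take b.length = b := List.take_left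
      have h2 : (a ++ b).take b.length = a.take b.length :=
        List.take_append_of_le_length hle'
      rw [← h, h2] at h1; exact h1.symm
    have ha : a = b ++ a.drop b.length := by
      conv_lhs => rw [← List.take_append_drop b.length a]
      rw [← hpre]
    have hbc : b ++ a.drop b.length = a.drop b.length ++ b := by
      have := h.symm
      rw [ha] at this
      rw [List.append_assoc] at this
      exact List.append_cancel_left this
    have hlt : (a.drop b.length).length < a.length := by
      have : 0 < b.length := List.length_pos_iff.mpr hB
      simp [List.length_drop]; omega
    obtain ⟨w, i, j, hw1, hw2⟩ := comm_struct b (a.drop b.length) hbc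
    refine ⟨w, i + j, i, ?_, hw1⟩
    rw [rep_add, ← hw1, ← hw2]
    exact ha
termination_by a.length + b.length
decreasing_by · omega
              · omega

theorem pow_eq_of_comm {a b : List Char} {x y : Nat} (h : a ++ b = b ++ a)
    (hlen : x * a.length = y * b.length) : rep a x = rep b y := by
  obtain ⟨w, i, j, rfl, rfl⟩ := comm_struct a b h
  rw [rep_rep, rep_rep]
  by_cases hw : w = []
  · simp [hw, rep_nil]
  · have hwpos : 0 < w.length := List.length_pos_iff.mpr hw
    rw [length_rep, length_rep] at hlen
    have heq : i * x * w.length = j * y * w.length := by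
      rw [Nat.mul_comm i x, Nat.mul_assoc, Nat.mul_comm j y, Nat.mul_assoc]
      exact hlen
    rw [Nat.eq_of_mul_eq_mul_right hwpos heq]

theorem comm_of_pow_eq_le {a b : List Char} {x y : Nat} (hle : a.length ≤ b.length)
    (hx : 1 ≤ x) (hy : 1 ≤ y) (h : rep a x = rep b y) : a ++ b = b ++ a := by
  have hab : a = b.take a.length := by
    have h1 : b.take a.length = ((rep b y).take b.length).take a.length := by
      rw [take_rep b hy]
    rw [List.take_take, Nat.min_eq_left hle, ← h, take_rep a hx] at h1
    exact h1.symm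
  have hb : b = a ++ b.drop a.length := by
    conv_lhs => rw [← List.take_append_drop a.length b]
    rw [← hab]
  set c := b.drop a.length with hc
  have h' : rep (a ++ c) y = rep a x := by rw [← hb]; exact h.symm
  have h2 : rep (c ++ a) y = rep a x := by
    have e : a ++ rep (c ++ a) y = a ++ rep a x := by
      rw [rot, h', comm_rep_self]
    exact List.append_cancel_left e
  have h3 : rep (c ++ a) y = rep (a ++ c) y := h2.trans h'.symm
  have h4 : c ++ a = a ++ c := by
    have e1 : c ++ a = (rep (c ++ a) y).take (c ++ a).length := (take_rep _ hy).symm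
    have e2 : (a ++ c).length = (c ++ a).length := by simp; omega
    rw [h3, ← e2, take_rep _ hy] at e1
    exact e1
  rw [hb, List.append_assoc, h4]

theorem comm_of_pow_eq {a b : List Char} {x y : Nat}
    (hx : 1 ≤ x) (hy : 1 ≤ y) (h : rep a x = rep b y) : a ++ b = b ++ a := by
  rcases Nat.le_total a.length b.length with hle | hle
  · exact comm_of_pow_eq_le hle hx hy h
  · exact (comm_of_pow_eq_le hle hy hx h.symm).symm

theorem uLoop_gcd (y x : Nat) (hy : y ≠ 0) : pvULoop x y = Nat.gcd x y := by
  rw [pvULoop]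
  rw [dif_neg hy]
  by_cases h : x % y = 0
  · rw [if_pos h, Nat.gcd_comm, Nat.gcd_eq_left (Nat.dvd_of_mod_eq_zero h)]
  · rw [if_neg h, uLoop_gcd (x % y) y h, Nat.gcd_comm y (x % y), ← Nat.gcd_rec, Nat.gcd_comm]
termination_by y
decreasing_by exact Nat.mod_lt _ (Nat.pos_of_ne_zero hy)

theorem toList_ne_nil {t : String} (ht : t ≠ "") : t.toList ≠ [] := by
  intro h
  exact ht (String.toList_inj.mp (by simp [h]))

-- the central equivalence on lists
theorem core (a b : List Char) (hb : b ≠ []) :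
    (if rep a (b.length / pvULoop a.length b.length) =
        rep b (a.length / pvULoop a.length b.length) then (1 : Int)
     else if (List.range 51).any (fun i => decide (rep a i = b)) then 1 else 0) =
    (if a ++ b = b ++ a then 1 else 0) := by
  have hbpos : 0 < b.length := List.length_pos_iff.mpr hb
  have hgcd : pvULoop a.length b.length = Nat.gcd a.length b.length :=
    uLoop_gcd _ _ (by omega)
  have hgpos : 0 < Nat.gcd a.length b.length := Nat.gcd_pos_of_pos_right _ hbpos
  set g := Nat.gcd a.length b.length with hgdef
  obtain ⟨p, hp⟩ : g ∣ a.length := Nat.gcd_dvd_left _ _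
  obtain ⟨q, hq⟩ : g ∣ b.length := Nat.gcd_dvd_right _ _
  have hx : b.length / g = q := by
    rw [hq, Nat.mul_div_cancel_left _ hgpos]
  have hyv : a.length / g = p := by
    rw [hp, Nat.mul_div_cancel_left _ hgpos]
  have hqpos : 1 ≤ q := by
    rcases Nat.eq_zero_or_pos q with h0 | h1
    · rw [h0, Nat.mul_zero] at hq; omega
    · exact h1
  have hlen : q * a.length = p * b.length := by rw [hp, hq]; ring
  rw [hgcd, hx, hyv]
  by_cases hcomm : a ++ b = b ++ a
  · rw [if_pos (pow_eq_of_comm hcomm hlen), if_pos hcomm]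
  · have hA : a ≠ [] := by
      intro h0; apply hcomm; rw [h0]; simp
    have hppos : 1 ≤ p := by
      have : 0 < a.length := List.length_pos_iff.mpr hA
      rcases Nat.eq_zero_or_pos p with h0 | h1
      · rw [h0, Nat.mul_zero] at hp; omega
      · exact h1
    have hne : ¬ rep a q = rep b p := fun h => hcomm (comm_of_pow_eq hqpos hppos h)
    rw [if_neg hne, if_neg hcomm]
    have hany : ¬ (List.range 51).any (fun i => decide (rep a i = b)) = true := by
      simp only [List.any_eq_true, List.mem_range, decide_eq_true_iff]
      rintro ⟨i, -, hi⟩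
      apply hcomm
      rw [← hi]
      exact comm_rep_self a i
    rw [if_neg hany]

theorem check_eq_alt (s t : String) (ht : t ≠ "") : check s t = check_alt s t := by
  unfold check check_alt
  simp only [pvU, pyRepeat_cast]
  exact core s.toList t.toList (toList_ne_nil ht)

-- ===== VERDICT (by name: the statement is the Claim_ definition above) =====
theorem check_spec : Claim_equal_check := by
  intro s t _ hpre
  unfold Spec_check
  exact check_eq_alt s t hpre
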